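-- pv_equiv track=rewrite | github.com/elondagan/choose_influencers | choose_influencers.py | choose_5
-- ===== SOURCE A (Python) =====
-- def choose_5(res_list, ids):
--     size = len(res_list)
--     max_spread = 0
--     decision = []
--
--     for a in range(size):
--         for b in range(size):
--             if b == a:
--                 continue
--             for c in range(size):
--                 if c == b or c == a:
--                     continue
--                 for d in range(size):
--                     if d == c or d == b or d == a:
--                         continue
--                     for e in range(size):
--                         if e == a or e == d or e == c or e == b or e == a:
--                             continue
--                         cur_spread = len(
--                             res_list[a].union(res_list[b].union(res_list[c].union(res_list[d].union(res_list[e])))))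
--                         if cur_spread > max_spread:
--                             max_spread = cur_spread
--                             decision = [ids[a], ids[b], ids[c], ids[d], ids[e]]
--     return decision, max_spread
-- ===== SOURCE B (Python) =====
-- def choose_5(res_list, ids):
--     # Enumerate 5-element combinations a<b<c<d<e (instead of all ordered
--     # 5-tuples) and build the union incrementally, hoisting partial unions
--     # out of the inner loops.
--     n = len(res_list)
--     best = ([], 0)
--     for a in range(n - 4):
--         ua = res_list[a]
--         for b in range(a + 1, n):
--             ub = ua | res_list[b]
--             for c in range(b + 1, n):
--                 uc = ub | res_list[c]
--                 for d in range(c + 1, n):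
--                     ud = uc | res_list[d]
--                     for e in range(d + 1, n):
--                         spread = len(ud | res_list[e])
--                         if spread > best[1]:
--                             best = ([ids[a], ids[b], ids[c], ids[d], ids[e]], spread)
--     return best
-- ===== Notes on version B (the rewrite author's own statement) =====
-- stated objective: faster
-- what changed: B enumerates every 5-element index set exactly once as an increasing combination a<b<c<d<e with partial unions hoisted out of the inner loops and built incrementally, instead of A's scan over all ~120 ordered 5-tuples per combination, each recomputing the full 5-way union from scratch; the strict-improvement update makes both return the lexicographically first maximal combination.
-- outside the precondition, e.g. on choose_5([set(), set(), set(), set(), set()], []): A returns ([], 0), B returns ([], 0)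
import Mathlib
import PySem

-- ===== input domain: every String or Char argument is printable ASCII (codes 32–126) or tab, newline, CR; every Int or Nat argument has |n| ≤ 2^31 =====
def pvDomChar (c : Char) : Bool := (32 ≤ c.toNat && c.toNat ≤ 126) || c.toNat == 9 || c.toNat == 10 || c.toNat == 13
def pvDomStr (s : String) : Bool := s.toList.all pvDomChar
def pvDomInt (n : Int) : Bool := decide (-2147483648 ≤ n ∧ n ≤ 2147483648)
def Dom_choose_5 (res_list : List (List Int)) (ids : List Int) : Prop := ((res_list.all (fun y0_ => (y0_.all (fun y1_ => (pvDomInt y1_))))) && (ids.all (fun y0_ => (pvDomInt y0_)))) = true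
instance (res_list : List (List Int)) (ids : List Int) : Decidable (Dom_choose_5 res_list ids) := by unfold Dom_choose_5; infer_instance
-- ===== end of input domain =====

-- B replaces A's scan over all ordered 5-tuples of distinct indices by a scan over
-- increasing combinations a<b<c<d<e with incrementally built partial unions (faster by
-- a large constant factor as measured); both return the same (decision, max_spread).


-- ===== PORT A =====
-- literal transliteration of A: `for x in range(size)` → foldl over List.range;
-- res_list[x] / ids[x] are only read at indices 0 ≤ x < size, where Python indexing is
-- exact, ported with getD (ids[x] in range is guaranteed by Pre_choose_5).
def choose_5 (res_list : List (List Int)) (ids : List Int) : List Int × Int :=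
  let size := res_list.length
  (List.range size).foldl (fun s a =>
    (List.range size).foldl (fun s b =>
      if b = a then s else
      (List.range size).foldl (fun s c =>
        if c = b ∨ c = a then s else
        (List.range size).foldl (fun s d =>
          if d = c ∨ d = b ∨ d = a then s else
          (List.range size).foldl (fun s e =>
            if e = a ∨ e = d ∨ e = c ∨ e = b ∨ e = a then s else
            let cur_spread : Int :=
              (PySem.Set.union (res_list.getD a []) (PySem.Set.union (res_list.getD b [])
                (PySem.Set.union (res_list.getD c []) (PySem.Set.union (res_list.getD d [])
                  (res_list.getD e []))))).length
            if cur_spread > s.2 then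
              ([ids.getD a 0, ids.getD b 0, ids.getD c 0, ids.getD d 0, ids.getD e 0], cur_spread)
            else s) s) s) s) s) ([], 0)

-- ===== PORT B =====
-- literal transliteration of B (Source B): `for b in range(a+1, n)` → foldl over
-- List.range' (a+1) (n-(a+1)); partial unions ua..ud are hoisted as in Source B.
def choose_5_alt (res_list : List (List Int)) (ids : List Int) : List Int × Int :=
  let n := res_list.length
  (List.range (n - 4)).foldl (fun s a =>
    let ua := res_list.getD a []
    (List.range' (a + 1) (n - (a + 1))).foldl (fun s b =>
      let ub := PySem.Set.union ua (res_list.getD b [])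
      (List.range' (b + 1) (n - (b + 1))).foldl (fun s c =>
        let uc := PySem.Set.union ub (res_list.getD c [])
        (List.range' (c + 1) (n - (c + 1))).foldl (fun s d =>
          let ud := PySem.Set.union uc (res_list.getD d [])
          (List.range' (d + 1) (n - (d + 1))).foldl (fun s e =>
            let spread : Int := (PySem.Set.union ud (res_list.getD e [])).length
            if spread > s.2 then
              ([ids.getD a 0, ids.getD b 0, ids.getD c 0, ids.getD d 0, ids.getD e 0], spread)
            else s) s) s) s) s) ([], 0)

-- ===== PRECONDITION & SPEC =====
-- Pre_ requires each res_list entry to be duplicate-free (the Python arguments are sets,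
-- which cannot hold duplicates), and excludes ids shorter than res_list when at least 5
-- sets are available, where A's ids[...] indexing can raise IndexError (in the degenerate
-- all-sets-empty corner of that region A never indexes ids and still returns, same value as B).
def Pre_choose_5 (res_list : List (List Int)) (ids : List Int) : Prop :=
  (∀ l ∈ res_list, l.Nodup) ∧ (res_list.length ≤ ids.length ∨ res_list.length < 5)
instance (res_list : List (List Int)) (ids : List Int) : Decidable (Pre_choose_5 res_list ids) := by
  unfold Pre_choose_5; infer_instance
def pvWitness_choose_5 : List (List Int) × List Int :=
  ([[1, 2], [2, 3], [4], [5], [1, 6]], [10, 20, 30, 40, 50])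

def Spec_choose_5 (res_list : List (List Int)) (ids : List Int) (out : List Int × Int) : Prop :=
  out = choose_5_alt res_list ids
instance (res_list : List (List Int)) (ids : List Int) (out : List Int × Int) :
    Decidable (Spec_choose_5 res_list ids out) := by unfold Spec_choose_5; infer_instance

-- ===== CLAIM (what is proved, stated in full; the proofs are below) =====
def Claim_equal_choose_5 : Prop := ∀ (res_list : List (List Int)) (ids : List Int),
  Dom_choose_5 res_list ids → Pre_choose_5 res_list ids →
  Spec_choose_5 res_list ids (choose_5 res_list ids)

-- ===== LEMMAS AND PROOFS =====

-- the set of influenced users for index i (Python: res_list[i])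
def pvGet (res : List (List Int)) (i : Nat) : List Int := res.getD i []
-- spread of a tuple of indices, in a form manifestly invariant under permutation
def pvF (res : List (List Int)) (t : List Nat) : Int :=
  ((PySem.Set.ofList (t.flatMap (pvGet res))).length : Int)
def pvDec (ids : List Int) (t : List Nat) : List Int := t.map (fun i => ids.getD i 0)
-- the common update step of both loops
def pvUpd (res : List (List Int)) (ids : List Int) (s : List Int × Int) (t : List Nat) :
    List Int × Int :=
  if pvF res t > s.2 then (pvDec ids t, pvF res t) else s

-- A's enumeration: all ordered 5-tuples of pairwise distinct indices, in lex order
def pvL5 (n a b c d : Nat) : List (List Nat) :=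
  (List.range n).flatMap fun e =>
    ((if e = a ∨ e = d ∨ e = c ∨ e = b ∨ e = a then [] else [[]]).map (e :: ·))
def pvL4 (n a b c : Nat) : List (List Nat) :=
  (List.range n).flatMap fun d =>
    ((if d = c ∨ d = b ∨ d = a then [] else pvL5 n a b c d).map (d :: ·))
def pvL3 (n a b : Nat) : List (List Nat) :=
  (List.range n).flatMap fun c =>
    ((if c = b ∨ c = a then [] else pvL4 n a b c).map (c :: ·))
def pvL2 (n a : Nat) : List (List Nat) :=
  (List.range n).flatMap fun b => ((if b = a then [] else pvL3 n a b).map (b :: ·))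
def pvLA (n : Nat) : List (List Nat) :=
  (List.range n).flatMap fun a => ((pvL2 n a).map (a :: ·))

-- B's enumeration: all strictly increasing 5-tuples, in lex order
def pvM5 (n d : Nat) : List (List Nat) :=
  (List.range' (d + 1) (n - (d + 1))).flatMap fun e => (([[]] : List (List Nat)).map (e :: ·))
def pvM4 (n c : Nat) : List (List Nat) :=
  (List.range' (c + 1) (n - (c + 1))).flatMap fun d => ((pvM5 n d).map (d :: ·))
def pvM3 (n b : Nat) : List (List Nat) :=
  (List.range' (b + 1) (n - (b + 1))).flatMap fun c => ((pvM4 n c).map (c :: ·))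
def pvM2 (n a : Nat) : List (List Nat) :=
  (List.range' (a + 1) (n - (a + 1))).flatMap fun b => ((pvM3 n b).map (b :: ·))
def pvLB (n : Nat) : List (List Nat) :=
  (List.range (n - 4)).flatMap fun a => ((pvM2 n a).map (a :: ·))

def pvSortedB (t : List Nat) : Bool := decide (t.Pairwise (· < ·))

lemma pv_foldl_ite_nil {α β : Type} (c : Prop) [Decidable c] (l : List α) (f : β → α → β) (s : β) :
    (if c then [] else l).foldl f s = if c then s else l.foldl f s := by
  split_ifs <;> rfl

lemma pvGet_nodup (res : List (List Int)) (h : ∀ l ∈ res, l.Nodup) (i : Nat) :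
    (pvGet res i).Nodup := by
  unfold pvGet
  by_cases hi : i < res.length
  · rw [List.getD_eq_getElem _ _ hi]; exact h _ (List.getElem_mem hi)
  · rw [List.getD_eq_default _ _ (by omega)]; exact List.nodup_nil

lemma pv_union_eq_ofList_append (s t : List Int) (h : s.Nodup) :
    PySem.Set.union s t = PySem.Set.ofList (s ++ t) := by
  show PySem.Set.update s t = _
  rw [PySem.Set.ofList_append, PySem.Set.ofList_eq_self_of_nodup _ h]

lemma pv_update_ofList_right (s y : List Int) :
    PySem.Set.update s (PySem.Set.ofList y) = PySem.Set.update s y := by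
  rw [PySem.Set.update_eq_append_filter, PySem.Set.update_eq_append_filter,
    PySem.Set.ofList_ofList]

lemma pv_ofList_append_ofList (x y : List Int) :
    PySem.Set.ofList (x ++ PySem.Set.ofList y) = PySem.Set.ofList (x ++ y) := by
  rw [PySem.Set.ofList_append, PySem.Set.ofList_append, pv_update_ofList_right]

lemma pv_ofList_ofList_append (x y : List Int) :
    PySem.Set.ofList (PySem.Set.ofList x ++ y) = PySem.Set.ofList (x ++ y) := by
  rw [PySem.Set.ofList_append, PySem.Set.ofList_append, PySem.Set.ofList_ofList]

-- A's right-nested 5-way union has the length pvF computes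
lemma pv_lenA (res : List (List Int)) (h : ∀ l ∈ res, l.Nodup) (a b c d e : Nat) :
    ((PySem.Set.union (pvGet res a) (PySem.Set.union (pvGet res b)
      (PySem.Set.union (pvGet res c) (PySem.Set.union (pvGet res d)
        (pvGet res e))))).length : Int) = pvF res [a, b, c, d, e] := by
  have n := pvGet_nodup res h
  unfold pvF
  rw [pv_union_eq_ofList_append _ _ (n d), pv_union_eq_ofList_append _ _ (n c),
    pv_ofList_append_ofList, pv_union_eq_ofList_append _ _ (n b), pv_ofList_append_ofList,
    pv_union_eq_ofList_append _ _ (n a), pv_ofList_append_ofList]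
  simp [pvGet]

-- B's left-nested (incremental) 5-way union has the same length pvF computes
lemma pv_lenB (res : List (List Int)) (h : ∀ l ∈ res, l.Nodup) (a b c d e : Nat) :
    ((PySem.Set.union (PySem.Set.union (PySem.Set.union (PySem.Set.union (pvGet res a)
      (pvGet res b)) (pvGet res c)) (pvGet res d)) (pvGet res e)).length : Int) =
    pvF res [a, b, c, d, e] := by
  have n := pvGet_nodup res h
  unfold pvF
  rw [pv_union_eq_ofList_append _ _ (n a),
    pv_union_eq_ofList_append _ _ (PySem.Set.nodup_ofList _), pv_ofList_ofList_append,
    pv_union_eq_ofList_append _ _ (PySem.Set.nodup_ofList _), pv_ofList_ofList_append,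
    pv_union_eq_ofList_append _ _ (PySem.Set.nodup_ofList _), pv_ofList_ofList_append]
  simp [pvGet, List.append_assoc]

-- pvF is invariant under permutations of the index tuple
lemma pvF_perm (res : List (List Int)) {t t' : List Nat} (hp : t.Perm t') :
    pvF res t = pvF res t' := by
  unfold pvF
  have h2 : (t.flatMap (pvGet res)).Perm (t'.flatMap (pvGet res)) :=
    List.Perm.flatMap_right _ hp
  have : (PySem.Set.ofList (t.flatMap (pvGet res))).Perm
      (PySem.Set.ofList (t'.flatMap (pvGet res))) := by
    rw [List.perm_ext_iff_of_nodup (PySem.Set.nodup_ofList _) (PySem.Set.nodup_ofList _)]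
    intro x; simp only [PySem.Set.mem_ofList]; exact h2.mem_iff
  exact_mod_cast this.length_eq

-- fold of A's loops = fold of pvUpd over pvLA
lemma pv_foldA (res : List (List Int)) (ids : List Int) (h : ∀ l ∈ res, l.Nodup) :
    choose_5 res ids = (pvLA res.length).foldl (pvUpd res ids) ([], 0) := by
  simp only [choose_5, pvLA, pvL2, pvL3, pvL4, pvL5, List.foldl_flatMap, List.foldl_map,
    pv_foldl_ite_nil, List.foldl_cons, List.foldl_nil]
  apply List.foldl_ext; intro s a _
  apply List.foldl_ext; intro s b _
  by_cases hb : b = a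
  · simp [hb]
  simp only [if_neg hb]
  apply List.foldl_ext; intro s c _
  by_cases hc : c = b ∨ c = a
  · simp [hc]
  simp only [if_neg hc]
  apply List.foldl_ext; intro s d _
  by_cases hd : d = c ∨ d = b ∨ d = a
  · simp [hd]
  simp only [if_neg hd]
  apply List.foldl_ext; intro s e _
  by_cases he : e = a ∨ e = d ∨ e = c ∨ e = b ∨ e = a
  · simp [he]
  simp only [if_neg he]
  unfold pvUpd pvDec
  rw [← pv_lenA res h a b c d e]
  simp [pvGet]

-- fold of B's loops = fold of pvUpd over pvLB
lemma pv_foldB (res : List (List Int)) (ids : List Int) (h : ∀ l ∈ res, l.Nodup) :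
    choose_5_alt res ids = (pvLB res.length).foldl (pvUpd res ids) ([], 0) := by
  simp only [choose_5_alt, pvLB, pvM2, pvM3, pvM4, pvM5, List.foldl_flatMap, List.foldl_map,
    List.foldl_cons, List.foldl_nil]
  apply List.foldl_ext; intro s a _
  apply List.foldl_ext; intro s b _
  apply List.foldl_ext; intro s c _
  apply List.foldl_ext; intro s d _
  apply List.foldl_ext; intro s e _
  unfold pvUpd pvDec
  rw [← pv_lenB res h a b c d e]
  simp [pvGet]

-- membership characterisations
lemma pv_mem_LA (n : Nat) (t : List Nat) :
    t ∈ pvLA n ↔ t.length = 5 ∧ t.Nodup ∧ ∀ x ∈ t, x < n := by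
  have h5 : ∀ a b c d s, s ∈ pvL5 n a b c d ↔
      ∃ e, e < n ∧ ¬(e = a ∨ e = d ∨ e = c ∨ e = b ∨ e = a) ∧ s = [e] := by
    intro a b c d s
    simp only [pvL5, List.mem_flatMap, List.mem_map, List.mem_ite_nil_left, List.mem_range,
      List.mem_singleton]
    constructor
    · rintro ⟨e, he, u, ⟨hc, rfl⟩, rfl⟩; exact ⟨e, he, hc, rfl⟩
    · rintro ⟨e, he, hc, rfl⟩; exact ⟨e, he, [], ⟨hc, rfl⟩, rfl⟩
  have h4 : ∀ a b c s, s ∈ pvL4 n a b c ↔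
      ∃ d e, d < n ∧ e < n ∧ ¬(d = c ∨ d = b ∨ d = a) ∧
        ¬(e = a ∨ e = d ∨ e = c ∨ e = b ∨ e = a) ∧ s = [d, e] := by
    intro a b c s
    simp only [pvL4, List.mem_flatMap, List.mem_map, List.mem_ite_nil_left]
    constructor
    · rintro ⟨d, hd, u, ⟨hc, hu⟩, rfl⟩
      obtain ⟨e, he, hce, rfl⟩ := (h5 a b c d u).mp hu
      exact ⟨d, e, List.mem_range.mp hd, he, hc, hce, rfl⟩
    · rintro ⟨d, e, hd, he, hc, hce, rfl⟩
      exact ⟨d, List.mem_range.mpr hd, [e], ⟨hc, (h5 a b c d [e]).mpr ⟨e, he, hce, rfl⟩⟩, rfl⟩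
  have h3 : ∀ a b s, s ∈ pvL3 n a b ↔
      ∃ c d e, c < n ∧ d < n ∧ e < n ∧ ¬(c = b ∨ c = a) ∧ ¬(d = c ∨ d = b ∨ d = a) ∧
        ¬(e = a ∨ e = d ∨ e = c ∨ e = b ∨ e = a) ∧ s = [c, d, e] := by
    intro a b s
    simp only [pvL3, List.mem_flatMap, List.mem_map, List.mem_ite_nil_left]
    constructor
    · rintro ⟨c, hcn, u, ⟨hc, hu⟩, rfl⟩
      obtain ⟨d, e, hd, he, h1, h2, rfl⟩ := (h4 a b c u).mp hu
      exact ⟨c, d, e, List.mem_range.mp hcn, hd, he, hc, h1, h2, rfl⟩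
    · rintro ⟨c, d, e, hcn, hd, he, hc, h1, h2, rfl⟩
      exact ⟨c, List.mem_range.mpr hcn, [d, e],
        ⟨hc, (h4 a b c [d, e]).mpr ⟨d, e, hd, he, h1, h2, rfl⟩⟩, rfl⟩
  have h2 : ∀ a s, s ∈ pvL2 n a ↔
      ∃ b c d e, b < n ∧ c < n ∧ d < n ∧ e < n ∧ ¬(b = a) ∧ ¬(c = b ∨ c = a) ∧
        ¬(d = c ∨ d = b ∨ d = a) ∧ ¬(e = a ∨ e = d ∨ e = c ∨ e = b ∨ e = a) ∧
        s = [b, c, d, e] := by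
    intro a s
    simp only [pvL2, List.mem_flatMap, List.mem_map, List.mem_ite_nil_left]
    constructor
    · rintro ⟨b, hbn, u, ⟨hb, hu⟩, rfl⟩
      obtain ⟨c, d, e, hcn, hd, he, hc, hh1, hh2, rfl⟩ := (h3 a b u).mp hu
      exact ⟨b, c, d, e, List.mem_range.mp hbn, hcn, hd, he, hb, hc, hh1, hh2, rfl⟩
    · rintro ⟨b, c, d, e, hbn, hcn, hd, he, hb, hc, hh1, hh2, rfl⟩
      exact ⟨b, List.mem_range.mpr hbn, [c, d, e],
        ⟨hb, (h3 a b [c, d, e]).mpr ⟨c, d, e, hcn, hd, he, hc, hh1, hh2, rfl⟩⟩, rfl⟩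
  constructor
  · intro h
    simp only [pvLA, List.mem_flatMap, List.mem_map, List.mem_range] at h
    obtain ⟨a, han, u, hu, rfl⟩ := h
    obtain ⟨b, c, d, e, hbn, hcn, hd, he, hb, hc, hh1, hh2, rfl⟩ := (h2 a u).mp hu
    refine ⟨rfl, ?_, ?_⟩
    · simp only [List.nodup_cons, List.mem_cons, List.not_mem_nil, List.nodup_nil,
        or_false, and_true]
      tauto
    · simp only [List.forall_mem_cons]
      exact ⟨han, hbn, hcn, hd, he, by simp⟩
  · rintro ⟨hlen, hnd, hbnd⟩
    match t, hlen with
    | [a, b, c, d, e], _ =>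
      simp only [List.nodup_cons, List.mem_cons, List.not_mem_nil, List.nodup_nil,
        or_false, and_true] at hnd
      simp only [pvLA, List.mem_flatMap, List.mem_map, List.mem_range]
      refine ⟨a, hbnd a (by simp), [b, c, d, e], (h2 a _).mpr
        ⟨b, c, d, e, hbnd b (by simp), hbnd c (by simp), hbnd d (by simp),
          hbnd e (by simp), ?_, ?_, ?_, ?_, rfl⟩, rfl⟩ <;> tauto

lemma pv_mem_LB (n : Nat) (t : List Nat) :
    t ∈ pvLB n ↔ t.length = 5 ∧ t.Pairwise (· < ·) ∧ ∀ x ∈ t, x < n := by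
  have w5 : ∀ d s, s ∈ pvM5 n d ↔ ∃ e, d + 1 ≤ e ∧ e < n ∧ s = [e] := by
    intro d s
    simp only [pvM5, List.mem_flatMap, List.mem_map, List.mem_range'_1, List.mem_singleton]
    constructor
    · rintro ⟨e, he, u, rfl, rfl⟩
      exact ⟨e, by omega, by omega, rfl⟩
    · rintro ⟨e, he1, he2, rfl⟩
      exact ⟨e, by omega, [], rfl, rfl⟩
  have w4 : ∀ c s, s ∈ pvM4 n c ↔
      ∃ d e, c + 1 ≤ d ∧ d + 1 ≤ e ∧ e < n ∧ s = [d, e] := by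
    intro c s
    simp only [pvM4, List.mem_flatMap, List.mem_map, List.mem_range'_1]
    constructor
    · rintro ⟨d, hd, u, hu, rfl⟩
      obtain ⟨e, he1, he2, rfl⟩ := (w5 d u).mp hu
      exact ⟨d, e, by omega, he1, he2, rfl⟩
    · rintro ⟨d, e, hd1, he1, he2, rfl⟩
      exact ⟨d, by omega, [e], (w5 d [e]).mpr ⟨e, he1, he2, rfl⟩, rfl⟩
  have w3 : ∀ b s, s ∈ pvM3 n b ↔
      ∃ c d e, b + 1 ≤ c ∧ c + 1 ≤ d ∧ d + 1 ≤ e ∧ e < n ∧ s = [c, d, e] := by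
    intro b s
    simp only [pvM3, List.mem_flatMap, List.mem_map, List.mem_range'_1]
    constructor
    · rintro ⟨c, hc, u, hu, rfl⟩
      obtain ⟨d, e, hd1, he1, he2, rfl⟩ := (w4 c u).mp hu
      exact ⟨c, d, e, by omega, hd1, he1, he2, rfl⟩
    · rintro ⟨c, d, e, hc1, hd1, he1, he2, rfl⟩
      exact ⟨c, by omega, [d, e], (w4 c [d, e]).mpr ⟨d, e, hd1, he1, he2, rfl⟩, rfl⟩
  have w2 : ∀ a s, s ∈ pvM2 n a ↔
      ∃ b c d e, a + 1 ≤ b ∧ b + 1 ≤ c ∧ c + 1 ≤ d ∧ d + 1 ≤ e ∧ e < n ∧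
        s = [b, c, d, e] := by
    intro a s
    simp only [pvM2, List.mem_flatMap, List.mem_map, List.mem_range'_1]
    constructor
    · rintro ⟨b, hb, u, hu, rfl⟩
      obtain ⟨c, d, e, hc1, hd1, he1, he2, rfl⟩ := (w3 b u).mp hu
      exact ⟨b, c, d, e, by omega, hc1, hd1, he1, he2, rfl⟩
    · rintro ⟨b, c, d, e, hb1, hc1, hd1, he1, he2, rfl⟩
      exact ⟨b, by omega, [c, d, e], (w3 b [c, d, e]).mpr
        ⟨c, d, e, hc1, hd1, he1, he2, rfl⟩, rfl⟩
  constructor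
  · intro h
    simp only [pvLB, List.mem_flatMap, List.mem_map, List.mem_range] at h
    obtain ⟨a, han, u, hu, rfl⟩ := h
    obtain ⟨b, c, d, e, hb1, hc1, hd1, he1, he2, rfl⟩ := (w2 a u).mp hu
    refine ⟨rfl, ?_, ?_⟩
    · simp only [List.pairwise_cons, List.forall_mem_cons, List.not_mem_nil,
        false_implies, implies_true, and_true, List.Pairwise.nil]
      omega
    · simp only [List.forall_mem_cons]
      refine ⟨by omega, by omega, by omega, by omega, by omega, by simp⟩
  · rintro ⟨hlen, hpw, hbnd⟩
    match t, hlen with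
    | [a, b, c, d, e], _ =>
      simp only [List.pairwise_cons, List.forall_mem_cons, List.not_mem_nil,
        false_implies, implies_true, and_true, List.Pairwise.nil] at hpw
      have hen : e < n := hbnd e (by simp)
      simp only [pvLB, List.mem_flatMap, List.mem_map, List.mem_range]
      exact ⟨a, by omega, [b, c, d, e], (w2 a _).mpr
        ⟨b, c, d, e, by omega, by omega, by omega, by omega, hen, rfl⟩, rfl⟩

-- lexicographic order machinery
lemma pv_lex_asymm : ∀ {x y : List Nat}, List.Lex (· < ·) x y → ¬ List.Lex (· < ·) y x := by
  intro x y h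
  induction h with
  | nil => intro h2; cases h2
  | @rel a l₁ b l₂ hab => intro h2; cases h2 with
    | rel hba => omega
    | cons _ => omega
  | @cons a l₁ l₂ _ ih => intro h2; cases h2 with
    | rel hba => omega
    | cons h3 => exact ih h3

lemma pv_pairwise_lex_flatMap (L : List Nat) (hL : L.Pairwise (· < ·))
    (g : Nat → List (List Nat)) (hg : ∀ a ∈ L, (g a).Pairwise (List.Lex (· < ·))) :
    (L.flatMap fun a => ((g a).map (a :: ·))).Pairwise (List.Lex (· < ·)) := by
  induction L with
  | nil => simp
  | cons a L ih =>
    rw [List.pairwise_cons] at hL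
    rw [List.flatMap_cons, List.pairwise_append]
    refine ⟨List.Pairwise.map _ (fun _ _ h => List.Lex.cons h) (hg a (by simp)), ?_, ?_⟩
    · exact ih hL.2 (fun b hb => hg b (List.mem_cons_of_mem _ hb))
    · intro x hx y hy
      obtain ⟨x', _, rfl⟩ := List.mem_map.mp hx
      obtain ⟨b, hb, hy2⟩ := List.mem_flatMap.mp hy
      obtain ⟨y', _, rfl⟩ := List.mem_map.mp hy2
      exact List.Lex.rel (hL.1 b hb)

lemma pv_L5_pairwise (n a b c d : Nat) : (pvL5 n a b c d).Pairwise (List.Lex (· < ·)) :=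
  pv_pairwise_lex_flatMap _ List.pairwise_lt_range _ (fun _ _ => by split_ifs <;> simp)

lemma pv_L4_pairwise (n a b c : Nat) : (pvL4 n a b c).Pairwise (List.Lex (· < ·)) :=
  pv_pairwise_lex_flatMap _ List.pairwise_lt_range _
    (fun d _ => by split_ifs <;> simp [pv_L5_pairwise])

lemma pv_L3_pairwise (n a b : Nat) : (pvL3 n a b).Pairwise (List.Lex (· < ·)) :=
  pv_pairwise_lex_flatMap _ List.pairwise_lt_range _
    (fun c _ => by split_ifs <;> simp [pv_L4_pairwise])

lemma pv_L2_pairwise (n a : Nat) : (pvL2 n a).Pairwise (List.Lex (· < ·)) :=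
  pv_pairwise_lex_flatMap _ List.pairwise_lt_range _
    (fun b _ => by split_ifs <;> simp [pv_L3_pairwise])

lemma pv_LA_pairwise (n : Nat) : (pvLA n).Pairwise (List.Lex (· < ·)) :=
  pv_pairwise_lex_flatMap _ List.pairwise_lt_range _ (fun a _ => pv_L2_pairwise n a)

lemma pv_M5_pairwise (n d : Nat) : (pvM5 n d).Pairwise (List.Lex (· < ·)) :=
  pv_pairwise_lex_flatMap _ (List.pairwise_lt_range' 1) _ (fun _ _ => by simp)

lemma pv_M4_pairwise (n c : Nat) : (pvM4 n c).Pairwise (List.Lex (· < ·)) :=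
  pv_pairwise_lex_flatMap _ (List.pairwise_lt_range' 1) _ (fun d _ => pv_M5_pairwise n d)

lemma pv_M3_pairwise (n b : Nat) : (pvM3 n b).Pairwise (List.Lex (· < ·)) :=
  pv_pairwise_lex_flatMap _ (List.pairwise_lt_range' 1) _ (fun c _ => pv_M4_pairwise n c)

lemma pv_M2_pairwise (n a : Nat) : (pvM2 n a).Pairwise (List.Lex (· < ·)) :=
  pv_pairwise_lex_flatMap _ (List.pairwise_lt_range' 1) _ (fun b _ => pv_M3_pairwise n b)

lemma pv_LB_pairwise (n : Nat) : (pvLB n).Pairwise (List.Lex (· < ·)) :=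
  pv_pairwise_lex_flatMap _ List.pairwise_lt_range _ (fun a _ => pv_M2_pairwise n a)

-- a sorted permutation of a list is lexicographically no greater
lemma pv_sorted_perm_lex : ∀ (l' l : List Nat), l'.Perm l → l'.Pairwise (· < ·) →
    l' = l ∨ List.Lex (· < ·) l' l := by
  intro l' l hperm hsort
  induction l' generalizing l with
  | nil => left; exact (hperm.nil_eq).symm ▸ rfl
  | cons x t' ih =>
    rcases l with _ | ⟨y, t⟩
    · exact absurd hperm.length_eq (by simp)
    rw [List.pairwise_cons] at hsort
    by_cases hxy : x = y
    · subst hxy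
      rcases ih t (hperm.cons_inv) hsort.2 with h | h
      · left; rw [h]
      · right; exact List.Lex.cons h
    · have hy : y ∈ x :: t' := hperm.mem_iff.mpr (by simp)
      have hy' : y ∈ t' := by
        rcases List.mem_cons.mp hy with h | h
        · omega
        · exact h
      right; exact List.Lex.rel (hsort.1 y hy')

-- an element before another in a Pairwise-R list splits the list
lemma pv_pairwise_split {R : List Nat → List Nat → Prop}
    (hA : ∀ x y, R x y → ¬ R y x) :
    ∀ (l : List (List Nat)), l.Pairwise R → ∀ {x y}, x ∈ l → y ∈ l → R x y →
      ∃ l₁ l₂, l = l₁ ++ x :: l₂ ∧ y ∈ l₂ := by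
  intro l hp x y hx hy hR
  induction l with
  | nil => cases hx
  | cons u t ih =>
    rw [List.pairwise_cons] at hp
    rcases List.mem_cons.mp hx with hx | hx
    · refine ⟨[], t, by simp [hx], ?_⟩
      rcases List.mem_cons.mp hy with hy | hy
      · exfalso; rw [hx, hy] at hR; exact hA _ _ hR hR
      · exact hy
    · rcases List.mem_cons.mp hy with hy | hy
      · exfalso; rw [hy] at hR; exact hA _ _ (hp.1 _ hx) hR
      · obtain ⟨l₁, l₂, hdec, hmem⟩ := ih hp.2 hx hy
        exact ⟨u :: l₁, l₂, by rw [hdec]; rfl, hmem⟩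

lemma pvUpd_snd_le (res : List (List Int)) (ids : List Int) (s : List Int × Int)
    (t : List Nat) : s.2 ≤ (pvUpd res ids s t).2 := by
  unfold pvUpd; split_ifs with h
  · exact le_of_lt h
  · exact le_refl _

lemma pvUpd_f_le (res : List (List Int)) (ids : List Int) (s : List Int × Int)
    (t : List Nat) : pvF res t ≤ (pvUpd res ids s t).2 := by
  unfold pvUpd; split_ifs with h
  · exact le_refl _
  · omega

lemma pvUpd_eq_of_le (res : List (List Int)) (ids : List Int) {s : List Int × Int}
    {t : List Nat} (h : pvF res t ≤ s.2) : pvUpd res ids s t = s :=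
  if_neg (by omega)

-- strict-improvement argmax folds may drop elements dominated by an earlier element
lemma pv_prune (res : List (List Int)) (ids : List Int) (p : List Nat → Bool) :
    ∀ (l : List (List Nat)) (s : List Int × Int), l.Nodup →
      (∀ t ∈ l, p t = false → pvF res t ≤ s.2 ∨
        ∃ t' l₁ l₂, p t' = true ∧ pvF res t = pvF res t' ∧ l = l₁ ++ t' :: l₂ ∧ t ∈ l₂) →
      l.foldl (pvUpd res ids) s = (l.filter p).foldl (pvUpd res ids) s := by
  intro l
  induction l with
  | nil => intro s _ _; rfl
  | cons u l ih =>
    intro s hnd h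
    rw [List.nodup_cons] at hnd
    by_cases hu : p u = true
    · rw [List.filter_cons_of_pos hu, List.foldl_cons, List.foldl_cons]
      apply ih _ hnd.2
      intro t ht hpt
      rcases h t (by simp [ht]) hpt with hle | ⟨t', l₁, l₂, hpt', hft, hdec, hmem⟩
      · left; exact le_trans hle (pvUpd_snd_le res ids s u)
      · rcases l₁ with _ | ⟨u', l₁⟩
        · simp only [List.nil_append, List.cons.injEq] at hdec
          left; rw [hft, ← hdec.1]; exact pvUpd_f_le res ids s u
        · simp only [List.cons_append, List.cons.injEq] at hdec
          exact Or.inr ⟨t', l₁, l₂, hpt', hft, hdec.2, hmem⟩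
    · rw [List.filter_cons_of_neg (by simpa using hu)]
      have hle : pvF res u ≤ s.2 := by
        rcases h u (by simp) (by simpa using hu) with hle | ⟨t', l₁, l₂, hpt', _, hdec, hmem⟩
        · exact hle
        · rcases l₁ with _ | ⟨u', l₁⟩
          · simp only [List.nil_append, List.cons.injEq] at hdec
            rw [← hdec.1] at hpt'; exact absurd hpt' hu
          · simp only [List.cons_append, List.cons.injEq] at hdec
            have : u ∈ l := by
              rw [hdec.2]; exact List.mem_append_right _ (List.mem_cons_of_mem _ hmem)
            exact absurd this hnd.1
      rw [List.foldl_cons, pvUpd_eq_of_le res ids hle]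
      apply ih _ hnd.2
      intro t ht hpt
      rcases h t (by simp [ht]) hpt with hle' | ⟨t', l₁, l₂, hpt', hft, hdec, hmem⟩
      · exact Or.inl hle'
      · rcases l₁ with _ | ⟨u', l₁⟩
        · simp only [List.nil_append, List.cons.injEq] at hdec
          rw [← hdec.1] at hpt'; exact absurd hpt' hu
        · simp only [List.cons_append, List.cons.injEq] at hdec
          exact Or.inr ⟨t', l₁, l₂, hpt', hft, hdec.2, hmem⟩

-- two Pairwise-R lists (R asymmetric) with the same members are equal
lemma pv_pairwise_eq {R : List Nat → List Nat → Prop} (hA : ∀ x y, R x y → ¬ R y x) :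
    ∀ (l₁ l₂ : List (List Nat)), l₁.Pairwise R → l₂.Pairwise R →
      (∀ x, x ∈ l₁ ↔ x ∈ l₂) → l₁ = l₂ := by
  intro l₁
  induction l₁ with
  | nil =>
    intro l₂ _ _ hm
    cases l₂ with
    | nil => rfl
    | cons y t₂ => exact absurd ((hm y).mpr (by simp)) (List.not_mem_nil)
  | cons x t ih =>
    intro l₂ hp1 hp2 hm
    cases l₂ with
    | nil => exact absurd ((hm x).mp (by simp)) (List.not_mem_nil)
    | cons y t₂ =>
      rw [List.pairwise_cons] at hp1 hp2
      have hxy : x = y := by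
        by_contra hne
        have hx2 : x ∈ y :: t₂ := (hm x).mp (by simp)
        have hy1 : y ∈ x :: t := (hm y).mpr (by simp)
        rcases List.mem_cons.mp hx2 with h | h
        · exact hne h
        · rcases List.mem_cons.mp hy1 with h' | h'
          · exact hne h'.symm
          · exact hA _ _ (hp1.1 y h') (hp2.1 x h)
      subst hxy
      congr 1
      apply ih _ hp1.2 hp2.2
      intro z
      constructor
      · intro hz
        rcases List.mem_cons.mp ((hm z).mp (List.mem_cons_of_mem _ hz)) with h | h
        · exact absurd (hp1.1 z hz) (h ▸ fun hh => hA _ _ hh hh)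
        · exact h
      · intro hz
        rcases List.mem_cons.mp ((hm z).mpr (List.mem_cons_of_mem _ hz)) with h | h
        · exact absurd (hp2.1 z hz) (h ▸ fun hh => hA _ _ hh hh)
        · exact h

lemma pv_filter_LA_eq_LB (n : Nat) : (pvLA n).filter pvSortedB = pvLB n := by
  apply pv_pairwise_eq (fun _ _ h => pv_lex_asymm h) _ _ ((pv_LA_pairwise n).filter _) (pv_LB_pairwise n)
  intro x
  rw [List.mem_filter, pv_mem_LA, pv_mem_LB]
  constructor
  · rintro ⟨⟨hlen, _, hbnd⟩, hp⟩
    exact ⟨hlen, of_decide_eq_true hp, hbnd⟩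
  · rintro ⟨hlen, hpw, hbnd⟩
    exact ⟨⟨hlen, hpw.imp (fun h => Nat.ne_of_lt h), hbnd⟩, decide_eq_true hpw⟩

lemma pv_LA_fold_eq_LB_fold (res : List (List Int)) (ids : List Int) (n : Nat) :
    (pvLA n).foldl (pvUpd res ids) ([], 0) = (pvLB n).foldl (pvUpd res ids) ([], 0) := by
  rw [← pv_filter_LA_eq_LB n]
  apply pv_prune
  · exact (pv_LA_pairwise n).imp (fun h => by intro he; subst he; exact pv_lex_asymm h h)
  · intro t ht hpt
    right
    obtain ⟨hlen, hnd, hbnd⟩ := (pv_mem_LA n t).mp ht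
    have hperm : (t.insertionSort (· ≤ ·)).Perm t := List.perm_insertionSort _ t
    have hnd' : (t.insertionSort (· ≤ ·)).Nodup := hperm.symm.nodup hnd
    have hsort : (t.insertionSort (· ≤ ·)).Pairwise (· < ·) :=
      ((List.pairwise_insertionSort (· ≤ ·) t).and hnd').imp
        (fun h => lt_of_le_of_ne h.1 h.2)
    have hne : t.insertionSort (· ≤ ·) ≠ t := by
      intro he
      rw [he] at hsort
      simp [pvSortedB, hsort] at hpt
    have hlex : List.Lex (· < ·) (t.insertionSort (· ≤ ·)) t :=
      (pv_sorted_perm_lex _ t hperm hsort).resolve_left hne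
    have hmem' : t.insertionSort (· ≤ ·) ∈ pvLA n :=
      (pv_mem_LA n _).mpr ⟨by rw [hperm.length_eq]; exact hlen, hnd',
        fun x hx => hbnd x (hperm.subset hx)⟩
    obtain ⟨l₁, l₂, hdec, hmm⟩ :=
      pv_pairwise_split (fun _ _ h => pv_lex_asymm h) (pvLA n) (pv_LA_pairwise n) hmem' ht hlex
    exact ⟨_, l₁, l₂, by unfold pvSortedB; exact decide_eq_true hsort,
      pvF_perm res hperm.symm, hdec, hmm⟩

-- ===== VERDICT (by name: the statement is the Claim_ definition above) =====
theorem choose_5_spec : Claim_equal_choose_5 := by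
  intro res ids _ hpre
  unfold Spec_choose_5
  rw [pv_foldA res ids hpre.1, pv_foldB res ids hpre.1, pv_LA_fold_eq_LB_fold]
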